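-- pv_equiv track=rewrite | github.com/IES-Rafael-Alberti/1dawb-ejercicios-u1-LautaroKruck | src/TAREA 6/factorialStr.py | factorialStr
-- ===== SOURCE A (Python) =====
-- def factorialStr(num):
--
--     total = 1
--     res = str(num) + "! => "
--
--     while num > 0 :
--         res += str(num)
--
--         if num != 1:
--             res += " x "
--         total *= num
--         num -=1
--     total = str(total)
--
--     res += " = " + total
--
--     return res
-- ===== SOURCE B (Python) =====
-- def factorialStr(num):
--     terms = list(range(num, 0, -1))
--     total = 1
--     for t in terms:
--         total *= t
--     return str(num) + "! => " + " x ".join(str(t) for t in terms) + " = " + str(total)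
-- ===== Notes on version B (the rewrite author's own statement) =====
-- stated objective: idiomatic
-- what changed: Materialise the countdown range once, compute the product over it in a separate pass, and build the term string with ' x '.join instead of the while-loop that mutates num and appends a conditional separator each iteration.
import Mathlib
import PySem

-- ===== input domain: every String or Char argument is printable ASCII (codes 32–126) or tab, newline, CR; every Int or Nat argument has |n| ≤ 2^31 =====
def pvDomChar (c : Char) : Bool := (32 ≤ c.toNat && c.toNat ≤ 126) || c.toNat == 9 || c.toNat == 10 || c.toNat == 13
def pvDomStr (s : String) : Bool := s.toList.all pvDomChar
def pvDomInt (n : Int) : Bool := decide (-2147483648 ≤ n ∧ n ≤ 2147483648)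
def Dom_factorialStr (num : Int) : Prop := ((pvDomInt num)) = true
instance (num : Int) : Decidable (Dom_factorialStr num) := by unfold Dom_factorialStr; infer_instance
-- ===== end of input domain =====

-- B replaces A's mutating while-loop (running product + conditional " x " separator) by one
-- materialised countdown range, a separate product pass, and a join — more idiomatic, same cost.

-- ===== PORT A =====
-- the 'while num > 0' loop of A, state (total, res), num mutated down to 0
def factorialStrLoop (num total : Int) (res : String) : Int × String :=
  if num > 0 then
    factorialStrLoop (num - 1) (total * num)
      ((res ++ PySem.Int.toStr num) ++ (if num ≠ 1 then " x " else ""))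
  else (total, res)
termination_by num.toNat
decreasing_by omega

def factorialStr (num : Int) : String :=
  let r := factorialStrLoop num 1 (PySem.Int.toStr num ++ "! => ")
  r.2 ++ " = " ++ PySem.Int.toStr r.1

-- ===== PORT B =====
def factorialStr_alt (num : Int) : String :=
  let terms := PySem.List.pyRange num 0 (-1)
  let total := terms.foldl (· * ·) 1
  PySem.Int.toStr num ++ "! => " ++
    PySem.Str.join " x " (terms.map PySem.Int.toStr) ++ " = " ++ PySem.Int.toStr total

-- ===== PRECONDITION & SPEC =====
def Spec_factorialStr (num : Int) (out : String) : Prop := out = factorialStr_alt num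
instance (num : Int) (out : String) : Decidable (Spec_factorialStr num out) := by unfold Spec_factorialStr; infer_instance

-- ===== CLAIM (what is proved, stated in full; the proofs are below) =====
def Claim_equal_factorialStr : Prop := ∀ (num : Int), Dom_factorialStr num → Spec_factorialStr num (factorialStr num)

-- ===== LEMMAS AND PROOFS =====

lemma loop_eq (n : Nat) : ∀ (total : Int) (res : String),
    factorialStrLoop ((n : Int) + 1) total res =
      ((PySem.List.pyRange ((n : Int) + 1) 0 (-1)).foldl (· * ·) total,
       res ++ PySem.Str.join " x "
         ((PySem.List.pyRange ((n : Int) + 1) 0 (-1)).map PySem.Int.toStr)) := by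
  induction n with
  | zero =>
    intro total res
    rw [factorialStrLoop, factorialStrLoop]
    norm_num [PySem.List.pyRange_neg_one_cons (show (0:Int) < 1 by norm_num),
      PySem.List.pyRange_neg_one_eq_nil (le_refl (0:Int))]
    decide
  | succ n ih =>
    intro total res
    rw [factorialStrLoop]
    push_cast
    have h2 : ((n : Int) + 1 + 1) - 1 = (n : Int) + 1 := by ring
    have hpos : (0:Int) < (n : Int) + 1 + 1 := by positivity
    rw [if_pos hpos, h2, ih]
    rw [PySem.List.pyRange_neg_one_cons (show (0:Int) < (n:Int) + 1 + 1 by positivity), h2]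
    refine Prod.ext ?_ ?_
    · simp [List.foldl_cons]
    · simp only [List.map_cons]
      rw [PySem.List.pyRange_neg_one_cons (show (0:Int) < (n:Int) + 1 by positivity)]
      apply String.toList_injective
      simp [PySem.Str.toList_join, PySem.Chars.join_cons_cons, String.toList_append]
      rw [if_neg (show ¬ ((n : Int) + 1 = 0) by omega)]
      rfl

-- ===== VERDICT (by name: the statement is the Claim_ definition above) =====
theorem factorialStr_spec : Claim_equal_factorialStr := by
  intro num _
  unfold Spec_factorialStr factorialStr factorialStr_alt
  by_cases h : 0 < num
  · obtain ⟨n, hn⟩ : ∃ n : Nat, num = (n : Int) + 1 :=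
      ⟨(num - 1).toNat, by omega⟩
    subst hn
    rw [loop_eq]
  · rw [factorialStrLoop, if_neg (by omega)]
    rw [PySem.List.pyRange_neg_one_eq_nil (by omega : num ≤ 0)]
    apply String.toList_injective
    simp [String.toList_append]
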